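-- pv_equiv track=rewrite | github.com/amyhlback/adventofcode2020 | 06.py | sumyes
-- ===== SOURCE A (Python) =====
-- def sumyes(data):
-- 	matching = 0
-- 	grouping = set()
-- 	for i in data:
-- 		if i == "":
-- 			matching += len(grouping)
-- 			grouping = set()
-- 		else:
-- 			grouping.update(i)
-- 	return matching + len(grouping)
-- ===== SOURCE B (Python) =====
-- def sumyes(data):
--     # two-phase: partition into groups (reset on ""), then aggregate distinct chars per group
--     groups = []
--     cur = []
--     for line in data:
--         if line == "":
--             groups.append(cur)
--             cur = []
--         else:
--             cur.append(line)
--     groups.append(cur)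
--     return sum(len(set("".join(g))) for g in groups)
-- ===== Notes on version B (the rewrite author's own statement) =====
-- stated objective: alternative
-- what changed: Replaced A's single fused loop (running total + running char-set flushed on sentinel "") by an explicit two-phase decomposition: first partition the lines into groups at empty lines, then sum len(set(''.join(group))) over the groups.
import Mathlib
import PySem

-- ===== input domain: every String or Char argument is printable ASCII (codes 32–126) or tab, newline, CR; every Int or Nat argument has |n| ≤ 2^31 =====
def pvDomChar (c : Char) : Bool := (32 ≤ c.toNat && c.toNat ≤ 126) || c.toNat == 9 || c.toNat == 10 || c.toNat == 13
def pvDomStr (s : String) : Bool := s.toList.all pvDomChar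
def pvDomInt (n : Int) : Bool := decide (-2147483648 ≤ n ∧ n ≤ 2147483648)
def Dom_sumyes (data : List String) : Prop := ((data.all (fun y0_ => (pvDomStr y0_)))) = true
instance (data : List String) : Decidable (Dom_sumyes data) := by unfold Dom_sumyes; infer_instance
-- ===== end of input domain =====

-- B replaces A's fused sentinel-accumulator loop by an explicit two-phase
-- partition-into-groups then sum-of-distinct-counts (objective: alternative decomposition).

-- ===== PORT A =====
-- one fused loop: running total + running set of answers, flushed on ""
def sumyes (data : List String) : Int :=
  let st := data.foldl
    (fun (st : Int × PySem.Set Char) i =>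
      if i = "" then (st.1 + PySem.Set.len st.2, PySem.Set.empty)
      else (st.1, PySem.Set.update st.2 i.toList))
    (0, PySem.Set.empty)
  st.1 + PySem.Set.len st.2

-- ===== PORT B =====
-- phase 1: partition lines into groups, resetting on ""
def pvPartB (data : List String) (st : List (List String) × List String) :
    List (List String) × List String :=
  data.foldl
    (fun (st : List (List String) × List String) line =>
      if line = "" then (st.1 ++ [st.2], []) else (st.1, st.2 ++ [line]))
    st

-- phase 2: len(set("".join(g))) for one group g
def pvCnt (g : List String) : Int :=
  PySem.Set.len (PySem.Set.ofList ((g.map String.toList).flatten))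

def sumyes_alt (data : List String) : Int :=
  let p := pvPartB data ([], [])
  ((p.1 ++ [p.2]).map pvCnt).sum

-- ===== PRECONDITION & SPEC =====
def Spec_sumyes (data : List String) (out : Int) : Prop := out = sumyes_alt data
instance (data : List String) (out : Int) : Decidable (Spec_sumyes data out) := by unfold Spec_sumyes; infer_instance

-- ===== CLAIM (what is proved, stated in full; the proofs are below) =====
def Claim_equal_sumyes : Prop := ∀ (data : List String), Dom_sumyes data → Spec_sumyes data (sumyes data)

-- ===== LEMMAS AND PROOFS =====

-- updating a set with more elements = the set of the concatenation
lemma set_update_ofList (L M : List Char) :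
    PySem.Set.update (PySem.Set.ofList L) M = PySem.Set.ofList (L ++ M) := by
  simp [PySem.Set.ofList_eq_foldl, PySem.Set.update, List.foldl_append]

-- the already-closed groups accumulator is only ever appended to
lemma pvPartB_shift (data : List String) (gs : List (List String)) (cur : List String) :
    pvPartB data (gs, cur) =
      (gs ++ (pvPartB data ([], cur)).1, (pvPartB data ([], cur)).2) := by
  induction data generalizing gs cur with
  | nil => simp [pvPartB]
  | cons i rest ih =>
    simp only [pvPartB, List.foldl_cons]
    split_ifs with h
    · show pvPartB rest (gs ++ [cur], []) =
        (gs ++ (pvPartB rest (([] : List (List String)) ++ [cur], [])).1,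
          (pvPartB rest (([] : List (List String)) ++ [cur], [])).2)
      rw [ih (gs ++ [cur]) [], ih (([] : List (List String)) ++ [cur]) []]
      simp
    · show pvPartB rest (gs, cur ++ [i]) =
        (gs ++ (pvPartB rest ([], cur ++ [i])).1, (pvPartB rest ([], cur ++ [i])).2)
      exact ih gs (cur ++ [i])

-- main invariant: A's loop from (m, set of cur's chars) = m + B's group counts
lemma key (data : List String) (m : Int) (cur : List String) :
    (let st := data.foldl
        (fun (st : Int × PySem.Set Char) i =>
          if i = "" then (st.1 + PySem.Set.len st.2, PySem.Set.empty)
          else (st.1, PySem.Set.update st.2 i.toList))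
        (m, PySem.Set.ofList ((cur.map String.toList).flatten));
      st.1 + PySem.Set.len st.2)
    = m + (((pvPartB data ([], cur)).1 ++ [(pvPartB data ([], cur)).2]).map pvCnt).sum := by
  induction data generalizing m cur with
  | nil => simp [pvPartB, pvCnt]
  | cons i rest ih =>
    simp only [List.foldl_cons, pvPartB]
    split_ifs with h
    · refine (ih (m + PySem.Set.len (PySem.Set.ofList ((cur.map String.toList).flatten))) []).trans ?_
      show _ = m + (((pvPartB rest (([] : List (List String)) ++ [cur], [])).1
          ++ [(pvPartB rest (([] : List (List String)) ++ [cur], [])).2]).map pvCnt).sum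
      rw [pvPartB_shift rest (([] : List (List String)) ++ [cur]) []]
      simp [pvCnt]
      ring
    · rw [set_update_ofList]
      have hflat : (cur.map String.toList).flatten ++ i.toList
          = (((cur ++ [i]).map String.toList)).flatten := by simp
      rw [hflat, ih m (cur ++ [i])]
      rfl

-- ===== VERDICT (by name: the statement is the Claim_ definition above) =====
theorem sumyes_spec : Claim_equal_sumyes := by
  intro data _
  unfold Spec_sumyes sumyes sumyes_alt
  have h := key data 0 []
  simpa using h
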